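-- pv_equiv track=rewrite | github.com/actions-marketplace-validations/teehooai_spidershield | src/spidershield/scanner/security_scan.py | _get_function_body
-- ===== SOURCE A (Python) =====
-- def _get_function_body(content: str, start: int, max_lines: int = 30) -> str:
--     """Extract the body of a Python function starting after the def line.
--
--     *start* points just past the regex match (end of ``def f(x: str)``).
--     We skip the remainder of the signature, any docstring, then collect
--     up to *max_lines* of the indented body.
--     """
--     lines = content[start:].split("\n")
--     body_lines: list[str] = []
--     body_indent = 0
--     in_docstring = False
--     past_preamble = False  # True once we've passed docstring / def tail
--
--     for line in lines:
--         stripped = line.lstrip()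
--
--         # --- skip inside multi-line docstring ---
--         if in_docstring:
--             if '"""' in stripped or "'''" in stripped:
--                 in_docstring = False
--             continue
--
--         # --- skip blank / comment / trailing def lines before body ---
--         if not past_preamble:
--             if not stripped or stripped.startswith("#"):
--                 continue
--             # Detect docstring start
--             for quote in ('"""', "'''"):
--                 if stripped.startswith(quote):
--                     # Single-line docstring: opening and closing on same line
--                     if stripped.count(quote) >= 2:
--                         # e.g. """Some doc."""  — skip entire line
--                         pass
--                     else:
--                         in_docstring = True
--                     break
--             else:
--                 # First real code line — start collecting body
--                 past_preamble = True
--                 body_indent = len(line) - len(stripped)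
--             if not past_preamble:
--                 continue
--
--         # --- collect body lines ---
--         if stripped == "":
--             body_lines.append("")
--             continue
--         current_indent = len(line) - len(stripped)
--         if current_indent < body_indent:
--             break  # dedent = end of function
--         body_lines.append(stripped)
--         if len(body_lines) >= max_lines:
--             break
--
--     return "\n".join(body_lines)
-- ===== SOURCE B (Python) =====
-- def _get_function_body(content: str, start: int, max_lines: int = 30) -> str:
--     lines = content[start:].split("\n")
--     n = len(lines)
--     # Phase 1: skip the preamble (blank/comment lines and docstrings),
--     # stopping at the first real code line.
--     i = 0
--     body_indent = 0
--     while i < n: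
--         line = lines[i]
--         stripped = line.lstrip()
--         if not stripped or stripped.startswith("#"):
--             i += 1
--             continue
--         if stripped.startswith('"""'):
--             quote = '"""'
--         elif stripped.startswith("'''"):
--             quote = "'''"
--         else:
--             body_indent = len(line) - len(stripped)
--             break
--         i += 1
--         if stripped.count(quote) >= 2:
--             continue  # single-line docstring
--         # multi-line docstring: consume up to and including the closing line
--         while i < n:
--             closing = '"""' in lines[i] or "'''" in lines[i]
--             i += 1
--             if closing:
--                 break
--     # Phase 2: collect body lines (count tracks how many were taken)
--     body = []
--     count = 0
--     while i < n:
--         line = lines[i]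
--         stripped = line.lstrip()
--         if stripped == "":
--             body.append("")
--             count += 1
--             i += 1
--             continue
--         if len(line) - len(stripped) < body_indent:
--             break
--         body.append(stripped)
--         count += 1
--         if count >= max_lines:
--             break
--         i += 1
--     return "\n".join(body)
-- ===== Notes on version B (the rewrite author's own statement) =====
-- stated objective: simpler
-- what changed: A's single for-loop threading four pieces of mutable state (body_lines, body_indent, in_docstring, past_preamble) is replaced by two explicit sequential phases: an index walk that skips the preamble (blank/comment lines and docstrings, with an inner loop consuming a multi-line docstring) and returns the body indent, then a separate collection loop that builds the body front-to-back with a plain counter.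
import Mathlib
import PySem

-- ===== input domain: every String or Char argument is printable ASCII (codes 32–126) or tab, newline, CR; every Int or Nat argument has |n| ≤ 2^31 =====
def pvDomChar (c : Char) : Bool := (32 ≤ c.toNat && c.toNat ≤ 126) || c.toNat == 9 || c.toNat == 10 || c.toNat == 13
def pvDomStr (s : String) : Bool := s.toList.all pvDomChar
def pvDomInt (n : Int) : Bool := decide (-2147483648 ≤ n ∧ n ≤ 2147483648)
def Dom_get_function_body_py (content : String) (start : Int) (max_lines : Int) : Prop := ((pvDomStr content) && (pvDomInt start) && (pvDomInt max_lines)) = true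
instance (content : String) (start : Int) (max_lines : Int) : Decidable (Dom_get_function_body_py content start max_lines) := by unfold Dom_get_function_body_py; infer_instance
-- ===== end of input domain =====

-- B replaces A's one for-loop with four boolean state flags by two explicit phases
-- (skip the preamble, then collect), built front-to-back with a line counter (objective: simpler).

-- ===== PORT A =====
-- the single for-loop of A, state (body_lines, body_indent, in_docstring, past_preamble)
def pvLoopA (maxl : Int) (lines : List String) (body : List String) (bi : Int)
    (doc past : Bool) : List String :=
  match lines with
  | [] => body
  | l :: ls =>
    let st := PySem.Str.lstrip l
    if doc then
      if PySem.Str.isIn "\"\"\"" st || PySem.Str.isIn "'''" st then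
        pvLoopA maxl ls body bi false past
      else pvLoopA maxl ls body bi doc past
    else if past then
      -- collect body lines
      if st = "" then pvLoopA maxl ls (body ++ [""]) bi doc past
      else if PySem.Str.len l - PySem.Str.len st < bi then body
      else if maxl ≤ (body.length : Int) + 1 then body ++ [st]
      else pvLoopA maxl ls (body ++ [st]) bi doc past
    else if st = "" ∨ PySem.Str.startswith st "#" = true then pvLoopA maxl ls body bi doc past
    else if PySem.Str.startswith st "\"\"\"" = true then
      if 2 ≤ PySem.Str.count st "\"\"\"" then pvLoopA maxl ls body bi doc past
      else pvLoopA maxl ls body bi true past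
    else if PySem.Str.startswith st "'''" = true then
      if 2 ≤ PySem.Str.count st "'''" then pvLoopA maxl ls body bi doc past
      else pvLoopA maxl ls body bi true past
    else
      -- first real code line: past_preamble := True, body_indent := indent, fall through to collect
      let bi' := PySem.Str.len l - PySem.Str.len st
      if st = "" then pvLoopA maxl ls (body ++ [""]) bi' doc true
      else if PySem.Str.len l - PySem.Str.len st < bi' then body
      else if maxl ≤ (body.length : Int) + 1 then body ++ [st]
      else pvLoopA maxl ls (body ++ [st]) bi' doc true

def get_function_body_py (content : String) (start : Int) (max_lines : Int) : String :=
  let lines := (PySem.Str.split? (PySem.Str.slice content (some start) none) "\n").getD []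
  PySem.Str.join "\n" (pvLoopA max_lines lines [] 0 false false)

-- ===== PORT B =====
-- inner while of phase 1: consume lines up to and including the docstring-closing line
def pvSkipDoc : List String → List String
  | [] => []
  | l :: ls => if PySem.Str.isIn "\"\"\"" l || PySem.Str.isIn "'''" l then ls else pvSkipDoc ls

theorem pvSkipDoc_length_le (ls : List String) : (pvSkipDoc ls).length ≤ ls.length := by
  induction ls with
  | nil => simp [pvSkipDoc]
  | cons l ls ih =>
    simp only [pvSkipDoc]
    split
    · simp
    · exact Nat.le_succ_of_le ih

-- phase 1: skip preamble, return (remaining lines, body_indent)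
def pvPhase1 : List String → List String × Int
  | [] => ([], 0)
  | l :: ls =>
    let st := PySem.Str.lstrip l
    if st = "" ∨ PySem.Str.startswith st "#" = true then pvPhase1 ls
    else if PySem.Str.startswith st "\"\"\"" = true then
      if 2 ≤ PySem.Str.count st "\"\"\"" then pvPhase1 ls
      else pvPhase1 (pvSkipDoc ls)
    else if PySem.Str.startswith st "'''" = true then
      if 2 ≤ PySem.Str.count st "'''" then pvPhase1 ls
      else pvPhase1 (pvSkipDoc ls)
    else (l :: ls, PySem.Str.len l - PySem.Str.len st)
termination_by ls => ls.length
decreasing_by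
  all_goals first
    | exact Nat.lt_succ_of_le (pvSkipDoc_length_le ls)
    | exact Nat.lt_succ_self _

-- phase 2: collect body lines front to back, cnt = number collected so far
def pvPhase2 (maxl bi : Int) : List String → Int → List String
  | [], _ => []
  | l :: ls, cnt =>
    let st := PySem.Str.lstrip l
    if st = "" then "" :: pvPhase2 maxl bi ls (cnt + 1)
    else if PySem.Str.len l - PySem.Str.len st < bi then []
    else if maxl ≤ cnt + 1 then [st]
    else st :: pvPhase2 maxl bi ls (cnt + 1)

def get_function_body_py_alt (content : String) (start : Int) (max_lines : Int) : String :=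
  let lines := (PySem.Str.split? (PySem.Str.slice content (some start) none) "\n").getD []
  let p := pvPhase1 lines
  PySem.Str.join "\n" (pvPhase2 max_lines p.2 p.1 0)

-- ===== PRECONDITION & SPEC =====
def Spec_get_function_body_py (content : String) (start : Int) (max_lines : Int) (out : String) : Prop := out = get_function_body_py_alt content start max_lines
instance (content : String) (start : Int) (max_lines : Int) (out : String) : Decidable (Spec_get_function_body_py content start max_lines out) := by unfold Spec_get_function_body_py; infer_instance

-- ===== CLAIM (what is proved, stated in full; the proofs are below) =====
def Claim_equal_get_function_body_py : Prop := ∀ (content : String) (start : Int) (max_lines : Int), Dom_get_function_body_py content start max_lines → Spec_get_function_body_py content start max_lines (get_function_body_py content start max_lines)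

-- ===== LEMMAS AND PROOFS =====

-- a pattern whose first char is not whitespace occurs in a line iff it occurs in its lstrip
theorem pvInfix_dropWhile (c0 : Char) (r cs : List Char) (hc : PySem.Chars.isspace c0 = false) :
    (c0 :: r) <:+: cs.dropWhile PySem.Chars.isspace ↔ (c0 :: r) <:+: cs := by
  induction cs with
  | nil => simp
  | cons c cs ih =>
    by_cases h : PySem.Chars.isspace c = true
    · rw [List.dropWhile_cons_of_pos h]
      rw [ih]
      constructor
      · exact fun h' => h'.trans (List.suffix_cons c cs).isInfix
      · rintro ⟨s, t, hst⟩
        cases s with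
        | nil =>
          simp at hst
          rw [hst.1] at hc
          rw [h] at hc
          exact absurd hc (by simp)
        | cons x s =>
          simp only [List.cons_append] at hst
          exact ⟨s, t, (List.cons.injEq _ _ _ _).mp hst |>.2⟩
    · rw [List.dropWhile_cons_of_neg h]

theorem pvIsIn_lstrip (q l : String) (c0 : Char) (r : List Char)
    (hq : q.toList = c0 :: r) (hc : PySem.Chars.isspace c0 = false) :
    PySem.Str.isIn q (PySem.Str.lstrip l) = PySem.Str.isIn q l := by
  rw [Bool.eq_iff_iff, PySem.Str.isIn_iff_infix, PySem.Str.isIn_iff_infix,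
      PySem.Str.toList_lstrip, PySem.Chars.lstrip, hq]
  exact pvInfix_dropWhile c0 r l.toList hc

theorem pvQuote_lstrip (l : String) :
    (PySem.Str.isIn "\"\"\"" (PySem.Str.lstrip l) || PySem.Str.isIn "'''" (PySem.Str.lstrip l))
      = (PySem.Str.isIn "\"\"\"" l || PySem.Str.isIn "'''" l) := by
  rw [pvIsIn_lstrip "\"\"\"" l '"' ['"', '"'] rfl (by decide),
      pvIsIn_lstrip "'''" l '\'' ['\'', '\''] rfl (by decide)]

-- A inside a docstring = A after B's skip-to-closing-line loop
theorem pvLoopA_doc (maxl : Int) (ls body : List String) (bi : Int) :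
    pvLoopA maxl ls body bi true false = pvLoopA maxl (pvSkipDoc ls) body bi false false := by
  induction ls with
  | nil => simp [pvLoopA, pvSkipDoc]
  | cons l ls ih =>
    rw [pvLoopA, pvSkipDoc]
    simp only [Bool.false_eq_true, if_false, if_true]
    rw [pvQuote_lstrip l]
    by_cases h : (PySem.Str.isIn "\"\"\"" l || PySem.Str.isIn "'''" l) = true
    · rw [if_pos h, if_pos h]
    · rw [if_neg h, if_neg h]; exact ih

-- A's collecting phase = B's phase 2 (cnt tracks len(body_lines))
theorem pvLoopA_collect (maxl bi : Int) (ls : List String) : ∀ body : List String,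
    pvLoopA maxl ls body bi false true = body ++ pvPhase2 maxl bi ls (body.length : Int) := by
  induction ls with
  | nil => intro body; simp [pvLoopA, pvPhase2]
  | cons l ls ih =>
    intro body
    rw [pvLoopA, pvPhase2]
    simp only [Bool.false_eq_true, if_false, if_true]
    split_ifs with h1 h2 h3
    · rw [ih]
      simp
    · simp
    · simp
    · rw [ih]
      simp

-- A's whole loop = B's two phases
theorem pvLoopA_eq_phases (maxl : Int) (ls : List String) :
    pvLoopA maxl ls [] 0 false false = pvPhase2 maxl (pvPhase1 ls).2 (pvPhase1 ls).1 0 := by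
  induction ls using pvPhase1.induct with
  | case1 => simp [pvLoopA, pvPhase1, pvPhase2]
  | case2 l ls st hskip ih =>
    rw [pvLoopA, pvPhase1]
    simp only [Bool.false_eq_true, if_false]
    rw [if_pos hskip, if_pos hskip]
    exact ih
  | case3 l ls st hskip htq hcnt ih =>
    rw [pvLoopA, pvPhase1]
    simp only [Bool.false_eq_true, if_false]
    rw [if_neg hskip, if_neg hskip, if_pos htq, if_pos htq, if_pos hcnt, if_pos hcnt]
    exact ih
  | case4 l ls st hskip htq hcnt ih =>
    rw [pvLoopA, pvPhase1]
    simp only [Bool.false_eq_true, if_false]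
    rw [if_neg hskip, if_neg hskip, if_pos htq, if_pos htq, if_neg hcnt, if_neg hcnt]
    rw [pvLoopA_doc]
    exact ih
  | case5 l ls st hskip htq hsq hcnt ih =>
    rw [pvLoopA, pvPhase1]
    simp only [Bool.false_eq_true, if_false]
    rw [if_neg hskip, if_neg hskip, if_neg htq, if_neg htq, if_pos hsq, if_pos hsq,
        if_pos hcnt, if_pos hcnt]
    exact ih
  | case6 l ls st hskip htq hsq hcnt ih =>
    rw [pvLoopA, pvPhase1]
    simp only [Bool.false_eq_true, if_false]
    rw [if_neg hskip, if_neg hskip, if_neg htq, if_neg htq, if_pos hsq, if_pos hsq,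
        if_neg hcnt, if_neg hcnt]
    rw [pvLoopA_doc]
    exact ih
  | case7 l ls st hskip htq hsq =>
    rw [pvLoopA, pvPhase1]
    simp only [Bool.false_eq_true, if_false]
    rw [if_neg hskip, if_neg hskip, if_neg htq, if_neg htq, if_neg hsq, if_neg hsq]
    have hst : ¬ PySem.Str.lstrip l = "" := fun h => hskip (Or.inl h)
    rw [pvPhase2]
    rw [if_neg hst, if_neg hst, if_neg (lt_irrefl _), if_neg (lt_irrefl _)]
    rw [pvLoopA_collect]
    norm_num

-- ===== VERDICT (by name: the statement is the Claim_ definition above) =====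
theorem get_function_body_py_spec : Claim_equal_get_function_body_py := by
  intro content start maxl _
  unfold Spec_get_function_body_py
  simp only [get_function_body_py, get_function_body_py_alt, pvLoopA_eq_phases]
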